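-- pv_equiv track=rewrite | github.com/aronboliveira/music-mood-auto-catalog | scripts/slice_random.py | _join_dots
-- ===== SOURCE A (Python) =====
-- def _join_dots(name: str) -> str:
--     """B.R.U.N.O → BRUNO (runs ≥ 4), Fictional-MarbleRose left alone (run = 3)."""
--     parts = name.split("-")
--     out_parts = []
--     for part in parts:
--         tokens = part.split(".")
--         segment_out: list[str] = []
--         run: list[str] = []
--         for tok in tokens:
--             if len(tok) == 1 and tok.isalnum():
--                 run.append(tok)
--             else:
--                 if len(run) >= 4:
--                     segment_out.append("".join(run))
--                 elif run:
--                     segment_out.append(".".join(run))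
--                 run = []
--                 segment_out.append(tok)
--         if len(run) >= 4:
--             segment_out.append("".join(run))
--         elif run:
--             segment_out.append(".".join(run))
--         out_parts.append(".".join(segment_out))
--     return "-".join(out_parts)
-- ===== SOURCE B (Python) =====
-- def _join_dots(name: str) -> str:
--     """Group-then-map: split each part's tokens into maximal runs of equal
--     'single alnum char' key, collapse True-runs of >=4 tokens, rejoin."""
--     def fix(part: str) -> str:
--         toks = part.split(".")
--         pieces = []
--         i, n = 0, len(toks)
--         while i < n:
--             k = len(toks[i]) == 1 and toks[i].isalnum()
--             j = i + 1
--             while j < n and (len(toks[j]) == 1 and toks[j].isalnum()) == k: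
--                 j += 1
--             grp = toks[i:j]
--             if k and len(grp) >= 4:
--                 pieces.append("".join(grp))
--             else:
--                 pieces.append(".".join(grp))
--             i = j
--         return ".".join(pieces)
--     return "-".join(fix(p) for p in name.split("-"))
-- ===== Notes on version B (the rewrite author's own statement) =====
-- stated objective: alternative
-- what changed: A's token-by-token loop with a pending run buffer and end-of-loop flush is replaced by a group-then-map pass: tokens are first split into maximal runs of equal key (single alnum char or not), then each run is mapped to one joined piece.
import Mathlib
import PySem

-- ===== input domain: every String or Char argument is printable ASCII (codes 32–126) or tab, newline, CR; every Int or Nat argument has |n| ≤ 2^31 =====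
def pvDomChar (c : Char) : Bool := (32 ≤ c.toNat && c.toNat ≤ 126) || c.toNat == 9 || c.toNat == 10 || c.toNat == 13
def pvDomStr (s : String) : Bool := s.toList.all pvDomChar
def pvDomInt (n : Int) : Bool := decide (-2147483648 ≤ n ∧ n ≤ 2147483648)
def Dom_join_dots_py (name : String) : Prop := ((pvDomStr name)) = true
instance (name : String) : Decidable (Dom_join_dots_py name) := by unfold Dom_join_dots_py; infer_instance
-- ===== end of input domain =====

-- B replaces A's pending-run accumulator (with its end-of-loop flush) by a group-then-map
-- pass: maximal equal-key runs of tokens, each run mapped to one piece; objective: alternative.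

-- ===== PORT A =====
-- A's run flush: append "".join(run) if len(run) >= 4, ".".join(run) if run nonempty
def pvFlushA (seg : List (List Char)) (run : List (List Char)) : List (List Char) :=
  if 4 ≤ run.length then seg ++ [PySem.Chars.join [] run]
  else if run ≠ [] then seg ++ [PySem.Chars.join ['.'] run]
  else seg

-- the body of A's `for tok in tokens` loop, state = (segment_out, run)
def pvStepA (st : List (List Char) × List (List Char)) (tok : List Char) :
    List (List Char) × List (List Char) :=
  if tok.length == 1 && PySem.Chars.strIsalnum tok then (st.1, st.2 ++ [tok])
  else (pvFlushA st.1 st.2 ++ [tok], [])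

def join_dots_py (name : String) : String :=
  let parts := PySem.Chars.splitOn name.toList ['-']
  let out_parts := parts.map (fun part =>
    let tokens := PySem.Chars.splitOn part ['.']
    let st := tokens.foldl pvStepA ([], [])
    PySem.Chars.join ['.'] (pvFlushA st.1 st.2))
  String.ofList (PySem.Chars.join ['-'] out_parts)

-- ===== PORT B =====
-- the grouping key: len(tok) == 1 and tok.isalnum()
def pvKeyB (tok : List Char) : Bool := tok.length == 1 && PySem.Chars.strIsalnum tok

-- Source B's inner while loop: longest prefix of tokens whose key equals k, and the rest
def pvSpanB (k : Bool) : List (List Char) → List (List Char) × List (List Char)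
  | [] => ([], [])
  | t :: ts =>
    if pvKeyB t == k then
      let (g, rest) := pvSpanB k ts
      (t :: g, rest)
    else ([], t :: ts)

theorem pvSpanB_snd_len (k : Bool) (ts : List (List Char)) :
    (pvSpanB k ts).2.length ≤ ts.length := by
  induction ts with
  | nil => simp [pvSpanB]
  | cons t ts ih =>
    simp only [pvSpanB]
    split
    · simpa using Nat.le_succ_of_le ih
    · simp

-- Source B's outer while loop: the consecutive maximal equal-key token groups with their key
def pvGroupsB : List (List Char) → List (Bool × List (List Char))
  | [] => []
  | t :: ts =>
    (pvKeyB t, t :: (pvSpanB (pvKeyB t) ts).1) :: pvGroupsB (pvSpanB (pvKeyB t) ts).2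
termination_by ts => ts.length
decreasing_by exact Nat.lt_succ_of_le (pvSpanB_snd_len _ ts)

-- one group → one piece: "".join for a True run of >= 4 tokens, else ".".join
def pvPieceB (g : Bool × List (List Char)) : List Char :=
  if g.1 && 4 ≤ g.2.length then PySem.Chars.join [] g.2
  else PySem.Chars.join ['.'] g.2

def join_dots_py_alt (name : String) : String :=
  let out_parts := (PySem.Chars.splitOn name.toList ['-']).map (fun part =>
    let tokens := PySem.Chars.splitOn part ['.']
    PySem.Chars.join ['.'] ((pvGroupsB tokens).map pvPieceB))
  String.ofList (PySem.Chars.join ['-'] out_parts)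

-- ===== PRECONDITION & SPEC =====
def Spec_join_dots_py (name : String) (out : String) : Prop := out = join_dots_py_alt name
instance (name : String) (out : String) : Decidable (Spec_join_dots_py name out) := by unfold Spec_join_dots_py; infer_instance

-- ===== CLAIM (what is proved, stated in full; the proofs are below) =====
def Claim_equal_join_dots_py : Prop := ∀ (name : String), Dom_join_dots_py name → Spec_join_dots_py name (join_dots_py name)

-- ===== LEMMAS AND PROOFS =====

theorem pvGroupsB_nil : pvGroupsB [] = [] := by rw [pvGroupsB]

theorem pvGroupsB_cons (t : List Char) (ts : List (List Char)) :
    pvGroupsB (t :: ts)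
      = (pvKeyB t, t :: (pvSpanB (pvKeyB t) ts).1)
        :: pvGroupsB (pvSpanB (pvKeyB t) ts).2 := by
  rw [pvGroupsB]

-- the piece A's flush emits for a pending run (0 or 1 strings)
def pvFlushPiece (run : List (List Char)) : List (List Char) :=
  if 4 ≤ run.length then [PySem.Chars.join [] run]
  else if run ≠ [] then [PySem.Chars.join ['.'] run]
  else []

theorem pvFlushPiece_nil : pvFlushPiece [] = [] := by simp [pvFlushPiece]

theorem pvFlushA_eq (seg run : List (List Char)) :
    pvFlushA seg run = seg ++ pvFlushPiece run := by
  unfold pvFlushA pvFlushPiece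
  split_ifs <;> simp

-- recursive semantics of A's inner loop starting with pending run `run`
def pvRunA (run : List (List Char)) : List (List Char) → List (List Char)
  | [] => pvFlushPiece run
  | t :: ts =>
    if pvKeyB t then pvRunA (run ++ [t]) ts
    else pvFlushPiece run ++ t :: pvRunA [] ts

theorem pvFoldA_eq (ts : List (List Char)) :
    ∀ seg run, (let st := ts.foldl pvStepA (seg, run); pvFlushA st.1 st.2)
      = seg ++ pvRunA run ts := by
  induction ts with
  | nil => intro seg run; simpa [pvRunA] using pvFlushA_eq seg run
  | cons t ts ih =>
    intro seg run
    simp only [List.foldl_cons, pvStepA, pvKeyB, pvRunA]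
    by_cases h : (t.length == 1 && PySem.Chars.strIsalnum t) = true
    · simp [h, ih]
    · simp [h, ih, pvFlushA_eq, List.append_assoc]

-- A's loop consumes a maximal True-run into one flush piece
theorem pvRunA_true_span (ts : List (List Char)) :
    ∀ run, pvRunA run ts
      = pvFlushPiece (run ++ (pvSpanB true ts).1) ++ pvRunA [] (pvSpanB true ts).2 := by
  induction ts with
  | nil => intro run; simp [pvSpanB, pvRunA, pvFlushPiece_nil]
  | cons t ts ih =>
    intro run
    by_cases h : pvKeyB t = true
    · simp only [pvRunA, pvSpanB, h, beq_self_eq_true, if_pos]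
      rw [ih (run ++ [t])]
      simp [List.append_assoc]
    · have hb : (pvKeyB t == true) = false := by simp [h]
      simp [pvRunA, pvSpanB, h, pvFlushPiece_nil]

-- A's loop passes a maximal False-run through token by token
theorem pvRunA_false_span (ts : List (List Char)) :
    pvRunA [] ts = (pvSpanB false ts).1 ++ pvRunA [] (pvSpanB false ts).2 := by
  induction ts with
  | nil => simp [pvSpanB, pvRunA, pvFlushPiece_nil]
  | cons t ts ih =>
    by_cases h : pvKeyB t = true
    · have hb : (pvKeyB t == false) = false := by simp [h]
      simp [pvSpanB, hb]
    · have hfs : pvKeyB t = false := by simpa using h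
      simp [pvRunA, pvSpanB, hfs, pvFlushPiece_nil, ih]

theorem pvJoin_append (d : List Char) (g rest : List (List Char)) (hg : g ≠ []) :
    PySem.Chars.join d (g ++ rest) = PySem.Chars.join d (PySem.Chars.join d g :: rest) := by
  induction g with
  | nil => exact absurd rfl hg
  | cons x g ih =>
    cases g with
    | nil =>
      cases rest with
      | nil => simp
      | cons r rs => simp [PySem.Chars.join_cons_cons, PySem.Chars.join_singleton]
    | cons y g' =>
      have ih' := ih (by simp)
      cases rest with
      | nil => simp
      | cons r rs =>
        simp only [List.cons_append] at ih' ⊢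
        rw [PySem.Chars.join_cons_cons d (PySem.Chars.join d (x :: y :: g')) r rs,
          PySem.Chars.join_cons_cons d x y (g' ++ r :: rs), ih',
          PySem.Chars.join_cons_cons d (PySem.Chars.join d (y :: g')) r rs,
          PySem.Chars.join_cons_cons d x y g']
        simp [List.append_assoc]

theorem pvRunA_ne_nil (t : List Char) (ts : List (List Char)) :
    pvRunA [] (t :: ts) ≠ [] := by
  by_cases h : pvKeyB t = true
  · simp only [pvRunA, h, if_pos, List.nil_append]
    rw [pvRunA_true_span ts [t]]
    have hfp : pvFlushPiece ([t] ++ (pvSpanB true ts).1) ≠ [] := by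
      unfold pvFlushPiece; split_ifs <;> simp_all
    intro hc
    exact hfp (List.append_eq_nil_iff.mp hc).1
  · simp [pvRunA, h]

-- joining a common head piece preserves the tail equality
theorem pvConsTail (rest : List (List Char))
    (ihr : PySem.Chars.join ['.'] (pvRunA [] rest)
      = PySem.Chars.join ['.'] ((pvGroupsB rest).map pvPieceB))
    (p : List Char) :
    PySem.Chars.join ['.'] (p :: pvRunA [] rest)
      = PySem.Chars.join ['.'] (p :: (pvGroupsB rest).map pvPieceB) := by
  cases rest with
  | nil => simp [pvRunA, pvGroupsB_nil, pvFlushPiece_nil]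
  | cons r rs =>
    cases hAe : pvRunA [] (r :: rs) with
    | nil => exact absurd hAe (pvRunA_ne_nil r rs)
    | cons a as =>
      cases hBe : (pvGroupsB (r :: rs)).map pvPieceB with
      | nil =>
        rw [List.map_eq_nil_iff, pvGroupsB_cons] at hBe
        exact absurd hBe (by simp)
      | cons b bs =>
        rw [hAe, hBe] at ihr
        rw [PySem.Chars.join_cons_cons, PySem.Chars.join_cons_cons, ihr]

-- per-part equivalence: A's flush list joins to the same string as B's group pieces
theorem pvPart_eq (n : Nat) (ts : List (List Char)) (hn : ts.length ≤ n) :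
    PySem.Chars.join ['.'] (pvRunA [] ts)
      = PySem.Chars.join ['.'] ((pvGroupsB ts).map pvPieceB) := by
  induction n generalizing ts with
  | zero =>
    have h0 : ts = [] := List.eq_nil_of_length_eq_zero (Nat.le_zero.mp hn)
    subst h0; simp [pvRunA, pvGroupsB_nil, pvFlushPiece_nil]
  | succ n ih =>
    cases ts with
    | nil => simp [pvRunA, pvGroupsB_nil, pvFlushPiece_nil]
    | cons t ts =>
      have hrest' : (pvSpanB (pvKeyB t) ts).2.length ≤ n := by
        have := pvSpanB_snd_len (pvKeyB t) ts
        simp at hn; omega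
      have ihr := ih _ hrest'
      by_cases h : pvKeyB t = true
      · -- True run: A flushes it as one piece equal to B's piece
        have hA : pvRunA [] (t :: ts)
            = pvFlushPiece (t :: (pvSpanB true ts).1) ++ pvRunA [] (pvSpanB true ts).2 := by
          simp only [pvRunA, h, if_pos, List.nil_append]
          rw [pvRunA_true_span ts [t]]; simp
        have hpiece : pvFlushPiece (t :: (pvSpanB true ts).1)
            = [pvPieceB (true, t :: (pvSpanB true ts).1)] := by
          unfold pvFlushPiece pvPieceB
          by_cases h4 : 3 ≤ (pvSpanB true ts).1.length <;> simp [h4]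
        rw [hA, hpiece, pvGroupsB_cons, h, List.map_cons, List.singleton_append]
        rw [h] at ihr
        exact pvConsTail _ ihr _
      · -- False run: A emits the tokens verbatim, B joins them into one piece
        have hfs : pvKeyB t = false := by simpa using h
        have hA : pvRunA [] (t :: ts)
            = (t :: (pvSpanB false ts).1) ++ pvRunA [] (pvSpanB false ts).2 := by
          simp only [pvRunA, hfs, Bool.false_eq_true, if_neg, not_false_eq_true,
            pvFlushPiece_nil, List.nil_append]
          rw [pvRunA_false_span ts]
          simp
        have hpiece : pvPieceB (false, t :: (pvSpanB false ts).1)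
            = PySem.Chars.join ['.'] (t :: (pvSpanB false ts).1) := by
          simp [pvPieceB]
        rw [hA, pvGroupsB_cons, hfs, List.map_cons, hpiece,
          pvJoin_append ['.'] _ _ (by simp)]
        rw [hfs] at ihr
        exact pvConsTail _ ihr _

-- ===== VERDICT (by name: the statement is the Claim_ definition above) =====
theorem join_dots_py_spec : Claim_equal_join_dots_py := by
  intro name _
  unfold Spec_join_dots_py join_dots_py join_dots_py_alt
  simp only
  apply congrArg String.ofList
  apply congrArg (PySem.Chars.join ['-'])
  apply List.map_congr_left
  intro part _
  rw [pvFoldA_eq]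
  simp only [List.nil_append]
  exact pvPart_eq _ _ (le_refl _)
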